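-- pv_equiv track=rewrite | github.com/yashwanth1k996/Computational-Programming-Course | 05-canqueenattack-Python/canqueenattack.py | canqueenattack
-- ===== SOURCE A (Python) =====
-- def canqueenattack(qR, qC, oR, oC):
-- 	# Your code goes here
-- 	kill = False
-- 	r = qR
-- 	c = qC
-- 	while(r < 8 and c < 8):
--
-- 		r +=1
-- 		c +=1
-- 		if(r == oR and c == oC):
-- 			kill = True
-- 	if(qR == oR or qC == oC):
-- 		kill = True
-- 	return kill
-- ===== SOURCE B (Python) =====
-- def canqueenattack(qR, qC, oR, oC):
--     # closed-form queen attack: same row, same column, or same diagonal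
--     return qR == oR or qC == oC or abs(oR - qR) == abs(oC - qC)
-- ===== Notes on version B (the rewrite author's own statement) =====
-- stated objective: simpler
-- what changed: Replaces A's mutating while-loop scan of the single down-right diagonal with one closed-form boolean expression checking row, column, or |dR|==|dC| diagonal.
-- intended difference: On inputs off the row/column where the target is on a diagonal of the queen but not on A's scanned down-right segment (dR==dC>=1 with oR<=8 and oC<=8), A returns False while B returns True, which is the intended queen-attack answer since a queen attacks along all four diagonals. — e.g. on canqueenattack(1, 1, 0, 0): A returns false, B returns true
import Mathlib
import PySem

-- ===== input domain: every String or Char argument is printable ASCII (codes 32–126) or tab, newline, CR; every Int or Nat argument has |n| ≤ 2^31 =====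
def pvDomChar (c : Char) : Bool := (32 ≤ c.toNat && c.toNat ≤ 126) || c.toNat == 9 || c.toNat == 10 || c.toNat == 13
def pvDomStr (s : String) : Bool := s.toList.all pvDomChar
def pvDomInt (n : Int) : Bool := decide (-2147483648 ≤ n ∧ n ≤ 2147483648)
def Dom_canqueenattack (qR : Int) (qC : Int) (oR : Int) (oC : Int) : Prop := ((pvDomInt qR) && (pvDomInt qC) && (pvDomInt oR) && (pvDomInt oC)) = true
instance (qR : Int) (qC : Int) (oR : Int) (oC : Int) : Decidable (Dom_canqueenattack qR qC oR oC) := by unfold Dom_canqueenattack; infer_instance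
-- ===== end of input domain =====

-- B replaces A's while-loop diagonal scan with the closed-form queen-attack test
-- (row, column, or |dR| = |dC|); on A's unscanned diagonals B returns the intended True (see D_).


-- ===== PORT A =====
-- the while-loop: state (r, c, kill); condition r < 8 ∧ c < 8 checked before each step
def canqueenattackLoop (oR : Int) (oC : Int) (r : Int) (c : Int) (kill : Bool) : Bool :=
  if h : r < 8 ∧ c < 8 then
    canqueenattackLoop oR oC (r + 1) (c + 1)
      (if r + 1 = oR ∧ c + 1 = oC then true else kill)
  else kill
termination_by (8 - r).toNat
decreasing_by omega

def canqueenattack (qR : Int) (qC : Int) (oR : Int) (oC : Int) : Bool :=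
  let kill := canqueenattackLoop oR oC qR qC false
  if qR = oR ∨ qC = oC then true else kill

-- ===== PORT B =====
def canqueenattack_alt (qR : Int) (qC : Int) (oR : Int) (oC : Int) : Bool :=
  (qR == oR) || (qC == oC) || ((oR - qR).natAbs == (oC - qC).natAbs)

-- ===== PRECONDITION & SPEC =====
-- Off the queen's row/column, on a diagonal of the queen but not on A's scanned down-right
-- segment, A returns false while B returns true — the intended value, since a queen attacks
-- along all four diagonals, not only the one A's loop walks.
def D_canqueenattack (qR : Int) (qC : Int) (oR : Int) (oC : Int) : Prop :=
  qR ≠ oR ∧ qC ≠ oC ∧ (oR - qR = oC - qC ∨ oR - qR = -(oC - qC)) ∧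
    ¬ (oR - qR = oC - qC ∧ qR < oR ∧ oR ≤ 8 ∧ oC ≤ 8)
instance (qR : Int) (qC : Int) (oR : Int) (oC : Int) : Decidable (D_canqueenattack qR qC oR oC) := by
  unfold D_canqueenattack; infer_instance

def Spec_canqueenattack (qR : Int) (qC : Int) (oR : Int) (oC : Int) (out : Bool) : Prop :=
  ¬ D_canqueenattack qR qC oR oC → out = canqueenattack_alt qR qC oR oC
instance (qR : Int) (qC : Int) (oR : Int) (oC : Int) (out : Bool) : Decidable (Spec_canqueenattack qR qC oR oC out) := by
  unfold Spec_canqueenattack; infer_instance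

def pvDiffWitness_canqueenattack : Int × Int × Int × Int := (1, 1, 0, 0)
def pvDiffWitnessOut_canqueenattack : Bool × Bool := (false, true)

-- ===== CLAIM (what is proved, stated in full; the proofs are below) =====
def Claim_unchanged_canqueenattack : Prop := ∀ (qR : Int) (qC : Int) (oR : Int) (oC : Int), Dom_canqueenattack qR qC oR oC → Spec_canqueenattack qR qC oR oC (canqueenattack qR qC oR oC)
def Claim_changed_canqueenattack : Prop := Dom_canqueenattack (pvDiffWitness_canqueenattack.1) (pvDiffWitness_canqueenattack.2.1) (pvDiffWitness_canqueenattack.2.2.1) (pvDiffWitness_canqueenattack.2.2.2) ∧ D_canqueenattack (pvDiffWitness_canqueenattack.1) (pvDiffWitness_canqueenattack.2.1) (pvDiffWitness_canqueenattack.2.2.1) (pvDiffWitness_canqueenattack.2.2.2) ∧ canqueenattack (pvDiffWitness_canqueenattack.1) (pvDiffWitness_canqueenattack.2.1) (pvDiffWitness_canqueenattack.2.2.1) (pvDiffWitness_canqueenattack.2.2.2) = pvDiffWitnessOut_canqueenattack.1 ∧ canqueenattack_alt (pvDiffWitness_canqueenattack.1) (pvDiffWitness_canqueenattack.2.1) (pvDiffWitness_canqueenattack.2.2.1)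 (pvDiffWitness_canqueenattack.2.2.2) = pvDiffWitnessOut_canqueenattack.2 ∧ pvDiffWitnessOut_canqueenattack.1 ≠ pvDiffWitnessOut_canqueenattack.2
def Claim_exact_canqueenattack : Prop := ∀ (qR : Int) (qC : Int) (oR : Int) (oC : Int), Dom_canqueenattack qR qC oR oC → D_canqueenattack qR qC oR oC → canqueenattack qR qC oR oC ≠ canqueenattack_alt qR qC oR oC

-- ===== LEMMAS AND PROOFS =====

-- the loop returns true iff it started true or the target lies on the scanned down-right segment
theorem canqueenattackLoop_eq (oR oC r c : Int) (kill : Bool) :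
    canqueenattackLoop oR oC r c kill
      = (kill || decide (oR - r = oC - c ∧ r < oR ∧ oR ≤ 8 ∧ oC ≤ 8)) := by
  fun_induction canqueenattackLoop oR oC r c kill with
  | case1 r c kill h ih =>
      simp only [dite_eq_ite] at ih
      rw [ih]
      by_cases hm : r + 1 = oR ∧ c + 1 = oC
      · have h1 : (oR - r = oC - c ∧ r < oR ∧ oR ≤ 8 ∧ oC ≤ 8) := by omega
        simp [hm, h1]
      · have h2 : (oR - (r + 1) = oC - (c + 1) ∧ r + 1 < oR ∧ oR ≤ 8 ∧ oC ≤ 8)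
            ↔ (oR - r = oC - c ∧ r < oR ∧ oR ≤ 8 ∧ oC ≤ 8) := by omega
        simp [hm, h2]
  | case2 r c kill h =>
      have h1 : ¬ (oR - r = oC - c ∧ r < oR ∧ oR ≤ 8 ∧ oC ≤ 8) := by omega
      simp [h1]

theorem canqueenattack_eq (qR qC oR oC : Int) :
    canqueenattack qR qC oR oC
      = (decide (qR = oR ∨ qC = oC)
         || decide (oR - qR = oC - qC ∧ qR < oR ∧ oR ≤ 8 ∧ oC ≤ 8)) := by
  unfold canqueenattack
  rw [canqueenattackLoop_eq]
  by_cases h : qR = oR ∨ qC = oC <;> simp [h]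

-- ===== VERDICT (by name: the statement is the Claim_ definition above) =====
theorem canqueenattack_spec : Claim_unchanged_canqueenattack := by
  intro qR qC oR oC _
  unfold Spec_canqueenattack
  intro hnD
  rw [canqueenattack_eq, canqueenattack_alt, Bool.eq_iff_iff]
  unfold D_canqueenattack at hnD
  simp only [Bool.or_eq_true, decide_eq_true_eq, beq_iff_eq, Int.natAbs_eq_natAbs_iff]
  omega

theorem canqueenattack_changed : Claim_changed_canqueenattack := by
  unfold Claim_changed_canqueenattack
  refine ⟨by decide, by decide, ?_, by decide, by decide⟩
  rw [canqueenattack_eq]; decide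

theorem canqueenattack_tight : Claim_exact_canqueenattack := by
  intro qR qC oR oC _ hD
  unfold D_canqueenattack at hD
  rw [canqueenattack_eq, canqueenattack_alt, Ne, Bool.eq_iff_iff]
  simp only [Bool.or_eq_true, decide_eq_true_eq, beq_iff_eq, Int.natAbs_eq_natAbs_iff]
  omega
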